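-- pv_equiv track=rewrite | github.com/Oryan-Hassidim/Ex | Ex3/lab3.py | all_ways_to_cut
-- ===== SOURCE A (Python) =====
-- def get_sliced_str(letters, slices):
--     result = []
--     s = slices
--     for i in slices:
--         t, letters = letters[:i], letters[i:]
--         result.append(t)
--     return result
--
-- def all_ways_to_cut(letters, num_words):
--     if len(letters) < num_words: return []
--     count = len(letters)
--     slices = []
--     s = [count]
--     flag = True
--
--     while flag:
--
--         while len(s) < num_words:
--             s.append(s[-1] - 1)
--             s[-2] = 1
--         if len(s) == num_words:
--             slices.append(get_sliced_str(letters, s))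
--
--         i = 0
--         while len(s) > 1 and s[-1] == 1:
--             s.pop()
--             i += 1
--         s[-1] += i
--         if len(s) >= 2:
--             s[-1] -= 1
--             s[-2] += 1
--
--         if len(s) == 1: flag = False
--
--     return slices
-- ===== SOURCE B (Python) =====
-- def all_ways_to_cut(letters, num_words):
--     if num_words <= 0 or len(letters) < num_words:
--         return []
--     if num_words == 1:
--         return [[letters]]
--     result = []
--     for f in range(1, len(letters) - num_words + 2):
--         head = letters[:f]
--         for tail in all_ways_to_cut(letters[f:], num_words - 1):
--             result.append([head] + tail)
--     return result
-- ===== Notes on version B (the rewrite author's own statement) =====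
-- stated objective: alternative
-- what changed: A enumerates the compositions of len(letters) with an iterative odometer-style successor loop over a mutable stack of part sizes and then slices the string per composition; B is a direct recursion on the first cut point (choose letters[:f], recurse on letters[f:] with num_words-1), which produces the same cuts in the same ascending order.
import Mathlib
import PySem

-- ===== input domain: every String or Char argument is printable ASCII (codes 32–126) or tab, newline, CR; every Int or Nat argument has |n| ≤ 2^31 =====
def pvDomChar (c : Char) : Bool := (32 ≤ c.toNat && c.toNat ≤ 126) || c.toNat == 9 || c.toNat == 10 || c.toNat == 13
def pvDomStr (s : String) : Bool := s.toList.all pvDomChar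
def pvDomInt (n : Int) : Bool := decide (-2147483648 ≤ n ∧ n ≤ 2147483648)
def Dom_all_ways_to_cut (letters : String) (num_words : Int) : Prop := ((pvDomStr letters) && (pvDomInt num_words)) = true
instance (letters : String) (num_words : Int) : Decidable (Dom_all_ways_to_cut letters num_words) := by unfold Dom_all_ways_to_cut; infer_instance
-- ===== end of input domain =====

-- B replaces A's iterative odometer loop over a mutable stack of part sizes by a direct
-- recursion on the first cut (alternative algorithm, same cost class); return values only —
-- neither implementation mutates observable state.

-- ===== PORT A =====

-- helper get_sliced_str: 'for i in slices: t, letters = letters[:i], letters[i:]; result.append(t)'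
def get_sliced_go (letters : String) (slices : List Int) (result : List String) : List String :=
  match slices with
  | [] => result
  | i :: rest =>
      get_sliced_go (PySem.Str.slice letters (some i) none) rest
        (result ++ [PySem.Str.slice letters none (some i)])

def get_sliced_str (letters : String) (slices : List Int) : List String :=
  get_sliced_go letters slices []

-- Python s[-1] (s is never empty on any reachable state; default 0 is dead code)
def pyLastI (s : List Int) : Int := (PySem.List.pyGet? s (-1)).getD 0

-- inner while #1: 'while len(s) < num_words: s.append(s[-1]-1); s[-2] = 1'
def awtc_expand (num_words : Int) (s : List Int) : List Int :=
  if h : (s.length : Int) < num_words then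
    awtc_expand num_words (s.dropLast ++ [1, pyLastI s - 1])
  else s
termination_by (num_words - s.length).toNat
decreasing_by
  have : s.length - 1 + 2 = s.length + 1 ∨ s.length = 0 := by omega
  simp; omega

-- inner while #2: 'while len(s) > 1 and s[-1] == 1: s.pop(); i += 1'
def awtc_pop (s : List Int) (i : Int) : List Int × Int :=
  if h : 1 < s.length ∧ pyLastI s = 1 then
    awtc_pop s.dropLast (i + 1)
  else (s, i)
termination_by s.length
decreasing_by simp; omega

-- outer 'while flag' loop; fuel only makes the recursion structural (it is proved never to run out)
def awtc_loop (letters : String) (num_words : Int) (s : List Int)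
    (slices : List (List String)) : Nat → List (List String)
  | 0 => slices
  | fuel + 1 =>
    let s1 := awtc_expand num_words s
    let slices1 := if (s1.length : Int) == num_words
                   then slices ++ [get_sliced_str letters s1] else slices
    let pi := awtc_pop s1 0
    let s3 := pi.1.dropLast ++ [pyLastI pi.1 + pi.2]
    let s4 := if 2 ≤ s3.length
              then s3.dropLast.dropLast ++ [pyLastI s3.dropLast + 1, pyLastI s3 - 1]
              else s3
    if s4.length == 1 then slices1 else awtc_loop letters num_words s4 slices1 fuel

def all_ways_to_cut (letters : String) (num_words : Int) : List (List String) :=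
  if PySem.Str.len letters < num_words then []
  else awtc_loop letters num_words [PySem.Str.len letters] []
        (2 ^ (PySem.Str.len letters).toNat + 1)

-- ===== PORT B =====

def all_ways_to_cut_alt (letters : String) (num_words : Int) : List (List String) :=
  if h0 : num_words ≤ 0 ∨ PySem.Str.len letters < num_words then []
  else if h1 : num_words = 1 then [[letters]]
  else
    (PySem.List.pyRange 1 (PySem.Str.len letters - num_words + 2) 1).flatMap
      (fun f =>
        (all_ways_to_cut_alt (PySem.Str.slice letters (some f) none) (num_words - 1)).map
          (fun tail => PySem.Str.slice letters none (some f) :: tail))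
termination_by num_words.toNat
decreasing_by omega


-- ===== PRECONDITION & SPEC =====
def Spec_all_ways_to_cut (letters : String) (num_words : Int) (out : List (List String)) : Prop := out = all_ways_to_cut_alt letters num_words
instance (letters : String) (num_words : Int) (out : List (List String)) : Decidable (Spec_all_ways_to_cut letters num_words out) := by unfold Spec_all_ways_to_cut; infer_instance

-- ===== CLAIM (what is proved, stated in full; the proofs are below) =====
def Claim_equal_all_ways_to_cut : Prop := ∀ (letters : String) (num_words : Int), Dom_all_ways_to_cut letters num_words → Spec_all_ways_to_cut letters num_words (all_ways_to_cut letters num_words)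

-- ===== LEMMAS AND PROOFS =====

-- ===== proof-side definitions =====

def lltb : List Int → List Int → Bool
  | _, [] => false
  | [], _ :: _ => true
  | a :: as, b :: bs => a < b || (a == b && lltb as bs)

def genComps (k : Nat) (n : Int) : List (List Int) :=
  if k = 0 ∨ n < (k : Int) then []
  else if k = 1 then [[n]]
  else (PySem.List.pyRange 1 (n - k + 2) 1).flatMap
        (fun f => (genComps (k - 1) (n - f)).map (f :: ·))

def IsComp (k : Nat) (n : Int) (c : List Int) : Prop :=
  c.length = k ∧ c.sum = n ∧ ∀ e ∈ c, 1 ≤ e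

def minC (L : Nat) (S : Int) : List Int := List.replicate (L - 1) 1 ++ [S - (L - 1 : Nat)]
def maxC (L : Nat) (S : Int) : List Int := (S - (L - 1 : Nat)) :: List.replicate (L - 1) 1

-- ===== lltb basics =====

theorem lltb_irrefl (c : List Int) : lltb c c = false := by
  induction c with
  | nil => rfl
  | cons a as ih => simp [lltb, ih]

theorem lltb_trans {a b c : List Int} (h1 : lltb a b = true) (h2 : lltb b c = true) :
    lltb a c = true := by
  induction a generalizing b c with
  | nil => cases c with
    | nil => cases b <;> simp [lltb] at h1 h2
    | cons _ _ => rfl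
  | cons x xs ih =>
    cases b with
    | nil => simp [lltb] at h1
    | cons y ys =>
      cases c with
      | nil => simp [lltb] at h2
      | cons z zs =>
        simp [lltb] at h1 h2 ⊢
        rcases h1 with h1 | ⟨rfl, h1⟩ <;> rcases h2 with h2 | ⟨rfl, h2⟩
        · exact Or.inl (lt_trans h1 h2)
        · exact Or.inl h1
        · exact Or.inl h2
        · exact Or.inr ⟨rfl, ih h1 h2⟩

theorem lltb_asymm {a b : List Int} (h : lltb a b = true) : lltb b a = false := by
  by_contra hh
  rw [Bool.not_eq_false] at hh
  have := lltb_trans h hh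
  rw [lltb_irrefl] at this
  exact absurd this (by simp)

theorem lltb_append_same (P a b : List Int) :
    lltb (P ++ a) (P ++ b) = lltb a b := by
  induction P with
  | nil => rfl
  | cons p ps ih => simp [lltb, ih]

-- ===== genComps: membership and sortedness =====

theorem sum_ge_length {c : List Int} (h : ∀ e ∈ c, 1 ≤ e) :
    (c.length : Int) ≤ c.sum := by
  induction c with
  | nil => simp
  | cons x xs ih =>
    have hx := h x (by simp)
    have := ih (fun e he => h e (by simp [he]))
    simp only [List.length_cons, List.sum_cons]
    push_cast
    omega

theorem lltb_cons_same (x : Int) (a b : List Int) :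
    lltb (x :: a) (x :: b) = lltb a b := by
  simp [lltb]

theorem mem_genComps : ∀ (k : Nat) (n : Int) (c : List Int),
    c ∈ genComps k n → IsComp k n c := by
  intro k
  induction k using Nat.strong_induction_on with
  | _ k ih =>
    intro n c hc
    rw [genComps] at hc
    split_ifs at hc with h1 h2
    · simp at hc
    · simp at hc
      subst hc
      push_neg at h1
      refine ⟨by simp [h2], by simp, ?_⟩
      intro e he
      simp at he
      subst he
      omega
    · push_neg at h1
      simp only [List.mem_flatMap, List.mem_map] at hc
      obtain ⟨f, hf, d, hd, rfl⟩ := hc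
      rw [PySem.List.mem_pyRange_one] at hf
      have hkk : k - 1 < k := by omega
      obtain ⟨hdl, hds, hdo⟩ := ih (k - 1) hkk (n - f) d hd
      refine ⟨by simp only [List.length_cons, hdl]; omega, by simp only [List.sum_cons, hds]; ring, ?_⟩
      intro e he
      rcases List.mem_cons.mp he with rfl | he
      · exact hf.1
      · exact hdo e he

theorem genComps_mem : ∀ (k : Nat) (n : Int) (c : List Int),
    IsComp k n c → 1 ≤ k → c ∈ genComps k n := by
  intro k
  induction k using Nat.strong_induction_on with
  | _ k ih =>
    intro n c ⟨hlen, hsum, hone⟩ hk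
    have hnk : (k : Int) ≤ n := by
      have := sum_ge_length hone
      omega
    rw [genComps]
    split_ifs with h1 h2
    · omega
    · subst h2
      have : c = [n] := by
        cases c with
        | nil => simp at hlen
        | cons x xs =>
          cases xs with
          | nil => simp at hsum; simp [hsum]
          | cons _ _ => simp at hlen
      simp [this]
    · cases c with
      | nil => simp at hlen; omega
      | cons c1 d =>
        simp only [List.mem_flatMap, List.mem_map]
        refine ⟨c1, ?_, d, ?_, rfl⟩
        · rw [PySem.List.mem_pyRange_one]
          have hds := sum_ge_length (fun e he => hone e (List.mem_cons_of_mem _ he))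
          simp only [List.length_cons] at hlen
          simp only [List.sum_cons] at hsum
          constructor
          · exact hone c1 (by simp)
          · push_cast
            omega
        · refine ih (k - 1) (by omega) (n - c1) d
            ⟨by simp at hlen; omega, by simp at hsum; omega, fun e he => hone e (by simp [he])⟩
            (by omega)

theorem pairwise_flatMap_groups (xs : List Int) (g : Int → List (List Int))
    (hxs : xs.Pairwise (· < ·))
    (hg : ∀ f ∈ xs, (g f).Pairwise (fun a b => lltb a b = true)) :
    (xs.flatMap (fun f => (g f).map (f :: ·))).Pairwise (fun a b => lltb a b = true) := by
  induction xs with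
  | nil => simp
  | cons f rest ihx =>
    rw [List.pairwise_cons] at hxs
    simp only [List.flatMap_cons]
    rw [List.pairwise_append]
    refine ⟨?_, ihx hxs.2 (fun f' hf' => hg f' (by simp [hf'])), ?_⟩
    · rw [List.pairwise_map]
      exact (hg f (by simp)).imp (fun {a b} h => by rw [lltb_cons_same]; exact h)
    · intro a ha b hb
      simp only [List.mem_map] at ha
      obtain ⟨a0, _, rfl⟩ := ha
      simp only [List.mem_flatMap, List.mem_map] at hb
      obtain ⟨f', hf', b0, _, rfl⟩ := hb
      have : f < f' := hxs.1 f' hf'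
      simp [lltb, this]

theorem genComps_sorted : ∀ (k : Nat) (n : Int),
    (genComps k n).Pairwise (fun a b => lltb a b = true) := by
  intro k
  induction k using Nat.strong_induction_on with
  | _ k ih =>
    intro n
    rw [genComps]
    split_ifs with h1 h2
    · simp
    · simp
    · push_neg at h1
      exact pairwise_flatMap_groups _ _ (PySem.List.pairwise_lt_pyRange_one 1 (n - k + 2))
        (fun f _ => ih (k - 1) (by omega) (n - f))

theorem range_pow_sum (n : Int) : ∀ (t : Nat) (j M : Int), M ≤ n + 1 → (M - j).toNat = t →
    ((PySem.List.pyRange j M 1).map (fun f => 2 ^ ((n - f).toNat))).sum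
      ≤ 2 ^ ((n - j + 1).toNat) - 1 := by
  intro t
  induction t with
  | zero =>
    intro j M hM ht
    rw [PySem.List.pyRange_one_eq_nil (by omega)]
    simp
  | succ t iht =>
    intro j M hM ht
    rw [PySem.List.pyRange_one_cons (by omega)]
    simp only [List.map_cons, List.sum_cons]
    have hrest := iht (j + 1) M hM (by omega)
    have hj : j ≤ n := by omega
    have h1 : (n - (j + 1) + 1).toNat = (n - j).toNat := by omega
    have h2 : (n - j + 1).toNat = (n - j).toNat + 1 := by omega
    rw [h1] at hrest
    rw [h2, pow_succ]
    omega

theorem genComps_length_le : ∀ (k : Nat) (n : Int),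
    (genComps k n).length ≤ 2 ^ n.toNat := by
  intro k
  induction k using Nat.strong_induction_on with
  | _ k ih =>
    intro n
    rw [genComps]
    split_ifs with h1 h2
    · simp
    · simpa using Nat.one_le_two_pow
    · push_neg at h1
      rw [List.length_flatMap]
      have hstep : ∀ f ∈ PySem.List.pyRange 1 (n - k + 2) 1,
          ((genComps (k - 1) (n - f)).map (f :: ·)).length ≤ 2 ^ ((n - f).toNat) := by
        intro f _
        rw [List.length_map]
        exact ih (k - 1) (by omega) (n - f)
      calc ((PySem.List.pyRange 1 (n - k + 2) 1).map
              (fun f => ((genComps (k - 1) (n - f)).map (f :: ·)).length)).sum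
          ≤ ((PySem.List.pyRange 1 (n - k + 2) 1).map (fun f => 2 ^ ((n - f).toNat))).sum :=
            List.sum_le_sum hstep
        _ ≤ 2 ^ ((n - 1 + 1).toNat) - 1 := range_pow_sum n (n - k + 1).toNat 1 (n - k + 2) (by omega) (by omega)
        _ ≤ 2 ^ n.toNat := by
            have h3 : (n - 1 + 1).toNat = n.toNat := by omega
            rw [h3]
            exact Nat.sub_le _ _

-- ===== min/max composition lemmas =====

theorem eq_replicate_one {c : List Int} {L : Nat} (h : IsComp L (L : Int) c) :
    c = List.replicate L 1 := by
  obtain ⟨hlen, hsum, hone⟩ := h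
  induction c generalizing L with
  | nil => simp at hlen; subst hlen; rfl
  | cons x xs ih =>
    cases L with
    | zero => simp at hlen
    | succ L =>
      have hxs : (xs.length : Int) ≤ xs.sum := sum_ge_length (fun e he => hone e (by simp [he]))
      have hx := hone x (by simp)
      simp only [List.length_cons] at hlen
      have hlen' : xs.length = L := by omega
      simp only [List.sum_cons] at hsum
      have hx1 : x = 1 := by push_cast at hsum ⊢; omega
      have hxsum : xs.sum = (L : Int) := by push_cast at hsum ⊢; omega
      rw [List.replicate_succ, hx1]
      rw [ih hlen' hxsum (fun e he => hone e (by simp [he]))]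

theorem not_lt_minC {c : List Int} {L : Nat} {S : Int} (hL : 1 ≤ L)
    (h : IsComp L S c) : lltb c (minC L S) = false := by
  obtain ⟨hlen, hsum, hone⟩ := h
  induction c generalizing L S with
  | nil => simp at hlen; omega
  | cons x xs ih =>
    have hx := hone x (by simp)
    cases L with
    | zero => omega
    | succ L =>
      simp only [List.length_cons] at hlen
      cases L with
      | zero =>
        -- minC 1 S = [S - 0]; c = [x] with x = S
        have hxs : xs = [] := by
          cases xs with
          | nil => rfl
          | cons _ _ => simp at hlen
        subst hxs
        simp only [List.sum_cons, List.sum_nil, add_zero] at hsum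
        have hm : minC 1 S = [S] := by simp [minC]
        rw [hm]
        simp [lltb]
        omega
      | succ L =>
        -- minC (L+2) S = 1 :: minC (L+1) (S-1)
        have hmin : minC (L + 2) S = 1 :: minC (L + 1) (S - 1) := by
          rw [minC, minC, show L + 2 - 1 = L + 1 by omega, show L + 1 - 1 = L by omega,
            List.replicate_succ]
          simp only [List.cons_append, List.cons.injEq, true_and]
          rw [show S - ((L + 1 : Nat) : Int) = S - 1 - ((L : Nat) : Int) by push_cast; omega]
        rw [hmin]
        simp only [lltb, Bool.or_eq_false_iff]
        constructor
        · simp; omega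
        · by_cases hx1 : x = 1
          · subst hx1
            simp only [beq_self_eq_true, Bool.true_and]
            exact ih (L := L + 1) (S := S - 1) (by omega) (by omega)
              (by simp only [List.sum_cons] at hsum; omega) (fun e he => hone e (by simp [he]))
          · simp [hx1]

theorem not_maxC_lt {c : List Int} {L : Nat} {S : Int} (hL : 1 ≤ L)
    (h : IsComp L S c) : lltb (maxC L S) c = false := by
  obtain ⟨hlen, hsum, hone⟩ := h
  cases c with
  | nil => simp at hlen; omega
  | cons x xs =>
    have hxs : (xs.length : Int) ≤ xs.sum := sum_ge_length (fun e he => hone e (by simp [he]))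
    simp only [List.length_cons] at hlen
    simp only [List.sum_cons] at hsum
    have hxle : x ≤ S - (L - 1 : Nat) := by
      have : xs.length = L - 1 := by omega
      rw [this] at hxs
      omega
    simp only [maxC, lltb, Bool.or_eq_false_iff]
    constructor
    · simp; omega
    · by_cases he : S - (L - 1 : Nat) = x
      · subst he
        simp only [beq_self_eq_true, Bool.true_and]
        -- xs is a comp of sum L-1 and length L-1, hence all ones; replicate vs replicate
        have hxscomp : IsComp (L - 1) ((L - 1 : Nat) : Int) xs := by
          refine ⟨by omega, by omega, fun e he => hone e (by simp [he])⟩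
        rw [eq_replicate_one hxscomp]
        exact lltb_irrefl _
      · simp [he]

-- ===== successor interval lemma =====

theorem lltb_cons_true {x y : Int} {xs ys : List Int} :
    lltb (x :: xs) (y :: ys) = true ↔ x < y ∨ (x = y ∧ lltb xs ys = true) := by
  simp [lltb]

theorem lltb_cons_false {x y : Int} {xs ys : List Int} :
    lltb (x :: xs) (y :: ys) = false ↔ ¬x < y ∧ (x ≠ y ∨ lltb xs ys = false) := by
  simp [lltb]
  tauto

theorem succ_interval : ∀ (P : List Int) (a : Int) (L : Nat) (S : Int) (c : List Int),
    1 ≤ L → (L : Int) + 1 ≤ S →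
    IsComp (P.length + 1 + L) (P.sum + a + S) c →
    (lltb (P ++ a :: maxC L S) c = true ↔ lltb c (P ++ (a + 1) :: minC L (S - 1)) = false) := by
  intro P
  induction P with
  | nil =>
    intro a L S c hL hS hc
    obtain ⟨hlen, hsum, hone⟩ := hc
    cases c with
    | nil => simp at hlen; omega
    | cons c1 c' =>
      simp only [List.length_nil, List.sum_nil, List.length_cons, zero_add,
        List.sum_cons] at hlen hsum
      have hc1 := hone c1 (by simp)
      have ho' : ∀ e ∈ c', 1 ≤ e := fun e he => hone e (List.mem_cons_of_mem _ he)
      simp only [List.nil_append, lltb_cons_true, lltb_cons_false]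
      by_cases h1 : c1 = a
      · subst h1
        have hmax : lltb (maxC L S) c' = false :=
          not_maxC_lt hL ⟨by omega, by omega, ho'⟩
        simp [hmax]
      · by_cases h2 : c1 = a + 1
        · subst h2
          have hmin : lltb c' (minC L (S - 1)) = false :=
            not_lt_minC hL ⟨by omega, by omega, ho'⟩
          simp [hmin]
        · constructor
          · intro h
            rcases h with h | ⟨rfl, _⟩
            · exact ⟨by omega, Or.inl (by omega)⟩
            · omega
          · intro ⟨h3, _⟩
            left
            omega
  | cons p P' ih =>
    intro a L S c hL hS hc
    obtain ⟨hlen, hsum, hone⟩ := hc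
    cases c with
    | nil => simp at hlen; omega
    | cons c1 c' =>
      simp only [List.length_cons, List.sum_cons] at hlen hsum
      have ho' : ∀ e ∈ c', 1 ≤ e := fun e he => hone e (List.mem_cons_of_mem _ he)
      simp only [List.cons_append, lltb_cons_true, lltb_cons_false]
      by_cases h1 : c1 = p
      · subst h1
        have := ih a L S c' hL hS ⟨by omega, by omega, ho'⟩
        constructor
        · intro h
          rcases h with h | ⟨_, h⟩
          · omega
          · exact ⟨by omega, Or.inr (this.mp h)⟩
        · intro ⟨_, h⟩
          rcases h with h | h
          · omega
          · exact Or.inr ⟨rfl, this.mpr h⟩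
      · constructor
        · intro h
          rcases h with h | ⟨h, _⟩
          · exact ⟨by omega, Or.inl (by omega)⟩
          · omega
        · intro ⟨h2, h3⟩
          rcases h3 with h3 | h3
          · left; omega
          · left; omega

-- ===== generic filter lemmas on sorted lists =====

theorem filter_sorted_step {l : List (List Int)} {lo lo' : List Int}
    (hs : l.Pairwise (fun a b => lltb a b = true)) (hmem : lo ∈ l)
    (hlt : lltb lo lo' = true)
    (hiff : ∀ x ∈ l, (lltb lo x = true ↔ lltb x lo' = false)) :
    l.filter (fun c => !lltb c lo) = lo :: l.filter (fun c => !lltb c lo') := by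
  obtain ⟨A, B, rfl⟩ := List.append_of_mem hmem
  rw [List.pairwise_append] at hs
  obtain ⟨hA, hloB, hcross⟩ := hs
  rw [List.pairwise_cons] at hloB
  obtain ⟨hloB1, hB⟩ := hloB
  have hAlo : ∀ x ∈ A, lltb x lo = true := fun x hx => hcross x hx lo (by simp)
  rw [List.filter_append, List.filter_append]
  have e1 : A.filter (fun c => !lltb c lo) = [] := by
    rw [List.filter_eq_nil_iff]
    intro x hx
    simp [hAlo x hx]
  have e2 : A.filter (fun c => !lltb c lo') = [] := by
    rw [List.filter_eq_nil_iff]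
    intro x hx
    simp [lltb_trans (hAlo x hx) hlt]
  rw [e1, e2]
  simp only [List.nil_append, List.filter_cons, lltb_irrefl, hlt, Bool.not_false,
    Bool.not_true]
  rw [if_pos trivial, if_neg Bool.false_ne_true]
  congr 1
  have e3 : B.filter (fun c => !lltb c lo) = B := by
    rw [List.filter_eq_self]
    intro b hb
    simp [lltb_asymm (hloB1 b hb)]
  have e4 : B.filter (fun c => !lltb c lo') = B := by
    rw [List.filter_eq_self]
    intro b hb
    have := (hiff b (by simp [hb])).mp (hloB1 b hb)
    simp [this]
  rw [e3, e4]

theorem filter_sorted_last {l : List (List Int)} {lo : List Int}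
    (hs : l.Pairwise (fun a b => lltb a b = true)) (hmem : lo ∈ l)
    (hmax : ∀ x ∈ l, lltb lo x = false) :
    l.filter (fun c => !lltb c lo) = [lo] := by
  obtain ⟨A, B, rfl⟩ := List.append_of_mem hmem
  rw [List.pairwise_append] at hs
  obtain ⟨hA, hloB, hcross⟩ := hs
  rw [List.pairwise_cons] at hloB
  obtain ⟨hloB1, hB⟩ := hloB
  have hBnil : B = [] := by
    cases B with
    | nil => rfl
    | cons b B' =>
      have h1 := hloB1 b (by simp)
      have h2 := hmax b (by simp)
      rw [h1] at h2
      exact absurd h2 (by simp)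
  subst hBnil
  rw [List.filter_append]
  have e1 : A.filter (fun c => !lltb c lo) = [] := by
    rw [List.filter_eq_nil_iff]
    intro x hx
    simp [hcross x hx lo (by simp)]
  rw [e1]
  simp [List.filter_cons, lltb_irrefl]

-- ===== port-side helper lemmas =====

theorem pyLastI_append (u : List Int) (x : Int) : pyLastI (u ++ [x]) = x := by
  simp [pyLastI, PySem.List.pyGet?_neg_one_append_singleton]

theorem pyLastI_single (x : Int) : pyLastI [x] = x := by
  simpa using pyLastI_append [] x

theorem expand_stop {nw : Int} {s : List Int} (h : ¬ ((s.length : Int) < nw)) :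
    awtc_expand nw s = s := by
  rw [awtc_expand, dif_neg h]

theorem expand_spec : ∀ (m : Nat) (nw : Int) (u : List Int) (x : Int),
    ((u.length + 1 + m : Nat) : Int) = nw →
    awtc_expand nw (u ++ [x]) = u ++ List.replicate m 1 ++ [x - (m : Int)] := by
  intro m
  induction m with
  | zero =>
    intro nw u x h
    rw [expand_stop (by simp; omega)]
    simp
  | succ m ih =>
    intro nw u x h
    rw [awtc_expand, dif_pos (by simp only [List.length_append, List.length_singleton]; push_cast at h ⊢; omega)]
    have harg : (u ++ [x]).dropLast ++ [1, pyLastI (u ++ [x]) - 1] = (u ++ [1]) ++ [x - 1] := by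
      simp [pyLastI_append]
    rw [harg, ih nw (u ++ [1]) (x - 1) (by simp only [List.length_append, List.length_singleton]; push_cast at h ⊢; omega)]
    rw [List.replicate_succ, show x - 1 - (m : Int) = x - ((m + 1 : Nat) : Int) by push_cast; ring]
    simp

theorem pop_stop {s : List Int} {i : Int} (h : ¬(1 < s.length ∧ pyLastI s = 1)) :
    awtc_pop s i = (s, i) := by
  rw [awtc_pop, dif_neg h]

theorem pop_ones (w : List Int) (b : Int) (hb : b ≠ 1) : ∀ (t : Nat) (i : Int),
    awtc_pop ((w ++ [b]) ++ List.replicate t 1) i = (w ++ [b], i + (t : Int)) := by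
  intro t
  induction t with
  | zero =>
    intro i
    rw [List.replicate_zero, List.append_nil,
      pop_stop (by rw [pyLastI_append]; tauto)]
    simp
  | succ t ih =>
    intro i
    rw [List.replicate_succ', ← List.append_assoc, awtc_pop,
      dif_pos ⟨by simp; omega, by rw [pyLastI_append]⟩]
    rw [List.dropLast_concat, ih (i + 1)]
    congr 1
    push_cast
    ring

theorem pop_all_ones : ∀ (t : Nat) (i : Int),
    awtc_pop (List.replicate (t + 1) 1) i = ([1], i + (t : Int)) := by
  intro t
  induction t with
  | zero =>
    intro i
    rw [pop_stop (by simp)]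
    simp
  | succ t ih =>
    intro i
    rw [List.replicate_succ', awtc_pop,
      dif_pos ⟨by simp, by rw [pyLastI_append]⟩]
    rw [List.dropLast_concat, ih (i + 1)]
    congr 1
    push_cast
    ring

theorem ones_or_split : ∀ (u : List Int),
    u = List.replicate u.length 1 ∨
      ∃ w b t, u = w ++ b :: List.replicate t 1 ∧ b ≠ 1 := by
  intro u
  induction u using List.reverseRecOn with
  | nil => left; rfl
  | append_singleton u x ih =>
    by_cases hx : x = 1
    · subst hx
      rcases ih with h | ⟨w, b, t, rfl, hb⟩
      · left
        conv_lhs => rw [h]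
        rw [← List.replicate_succ']
        congr 1
        simp
      · right
        exact ⟨w, b, t + 1, by simp [List.replicate_succ'], hb⟩
    · right
      exact ⟨u, x, 0, by simp, hx⟩

-- ===== Rf: the remaining-output list, and its step lemmas =====

def Rf (k : Nat) (n : Int) (lo : List Int) : List (List Int) :=
  (genComps k n).filter (fun c => !lltb c lo)

theorem maxC_comp {L : Nat} {S : Int} (hL : 1 ≤ L) (hS : (L : Int) ≤ S) :
    IsComp L S (maxC L S) := by
  refine ⟨by simp [maxC]; omega, ?_, ?_⟩
  · simp [maxC, List.sum_replicate]
    try omega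
  · intro e he
    simp only [maxC, List.mem_cons, List.mem_replicate] at he
    rcases he with rfl | ⟨_, rfl⟩
    · omega
    · exact le_refl 1

theorem Rf_succ {k : Nat} {n : Int} (P : List Int) (a : Int) (L : Nat) (S : Int)
    (hL : 1 ≤ L) (hS : (L : Int) + 1 ≤ S) (hk : P.length + 1 + L = k)
    (hn : P.sum + a + S = n) (hP : ∀ e ∈ P, 1 ≤ e) (ha : 1 ≤ a) :
    Rf k n (P ++ a :: maxC L S)
      = (P ++ a :: maxC L S) :: Rf k n (P ++ (a + 1) :: minC L (S - 1)) := by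
  have hcomp : IsComp k n (P ++ a :: maxC L S) := by
    obtain ⟨h1, h2, h3⟩ := maxC_comp (L := L) (S := S) hL (by omega)
    refine ⟨?_, ?_, ?_⟩
    · simp only [List.length_append, List.length_cons, h1]
      omega
    · simp only [List.sum_append, List.sum_cons, h2]
      omega
    intro e he
    simp only [List.mem_append, List.mem_cons] at he
    rcases he with he | rfl | he
    · exact hP e he
    · exact ha
    · exact h3 e he
  apply filter_sorted_step (genComps_sorted k n)
    (genComps_mem k n _ hcomp (by omega))
  · rw [lltb_append_same, lltb_cons_true]
    left
    omega
  · intro x hx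
    have hxc := mem_genComps k n x hx
    rw [← hk, ← hn] at hxc
    exact succ_interval P a L S x hL hS hxc

theorem Rf_max {k : Nat} {n : Int} (hk : 1 ≤ k) (hkn : (k : Int) ≤ n) :
    Rf k n (maxC k n) = [maxC k n] := by
  apply filter_sorted_last (genComps_sorted k n)
    (genComps_mem k n _ (maxC_comp hk hkn) hk)
  intro x hx
  exact not_maxC_lt hk (mem_genComps k n x hx)

theorem Rf_min {k : Nat} {n : Int} (hk : 1 ≤ k) :
    Rf k n (minC k n) = genComps k n := by
  rw [Rf, List.filter_eq_self]
  intro c hc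
  simp [not_lt_minC hk (mem_genComps k n c hc)]

-- ===== one iteration of the outer loop =====

def stepEmit (letters : String) (nw : Int) (slices : List (List String)) (s1 : List Int) :
    List (List String) :=
  if (s1.length : Int) == nw then slices ++ [get_sliced_str letters s1] else slices

def stepNext (s1 : List Int) : List Int :=
  let pi := awtc_pop s1 0
  let s3 := pi.1.dropLast ++ [pyLastI pi.1 + pi.2]
  if 2 ≤ s3.length then s3.dropLast.dropLast ++ [pyLastI s3.dropLast + 1, pyLastI s3 - 1] else s3

theorem loop_unfold (letters : String) (nw : Int) (s : List Int) (slices : List (List String))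
    (fuel : Nat) :
    awtc_loop letters nw s slices (fuel + 1) =
      if (stepNext (awtc_expand nw s)).length == 1 then stepEmit letters nw slices (awtc_expand nw s)
      else awtc_loop letters nw (stepNext (awtc_expand nw s))
            (stepEmit letters nw slices (awtc_expand nw s)) fuel := rfl

theorem stepNext_single (x : Int) : stepNext [x] = [x + 0] := by
  rw [stepNext, pop_stop (by simp)]
  simp [pyLastI_single]

theorem stepNext_ones (T : Nat) : stepNext (List.replicate (T + 1) 1) = [1 + (T : Int)] := by
  rw [stepNext, pop_all_ones T 0]
  simp [pyLastI_single]

theorem stepNext_split_nil (b : Int) (T : Nat) (hb : b ≠ 1) :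
    stepNext (([] ++ [b]) ++ List.replicate T 1) = [b + (T : Int)] := by
  rw [stepNext, pop_ones [] b hb T 0]
  simp [pyLastI_single]

theorem stepNext_split (w' : List Int) (aa b : Int) (T : Nat) (hb : b ≠ 1) :
    stepNext (((w' ++ [aa]) ++ [b]) ++ List.replicate T 1)
      = (w' ++ [aa + 1]) ++ [b + (T : Int) - 1] := by
  rw [stepNext, pop_ones (w' ++ [aa]) b hb T 0]
  simp only [List.dropLast_concat, pyLastI_append]
  rw [if_pos (by simp)]
  simp [List.dropLast_concat, pyLastI_append]

-- ===== the loop invariant proof =====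

def loState (k : Nat) (u : List Int) (x : Int) : List Int :=
  u ++ List.replicate (k - (u.length + 1)) 1 ++ [x - ((k - (u.length + 1) : Nat) : Int)]

def LoopHyp (fuel : Nat) : Prop :=
  ∀ (letters : String) (k : Nat) (u : List Int) (x : Int) (acc : List (List String)),
    1 ≤ k → (∀ e ∈ u, 1 ≤ e) → u.length + 1 ≤ k →
    ((k - (u.length + 1) : Nat) : Int) + 1 ≤ x →
    (Rf k ((u ++ [x]).sum) (loState k u x)).length < fuel →
    awtc_loop letters (k : Int) (u ++ [x]) acc fuel
      = acc ++ (Rf k ((u ++ [x]).sum) (loState k u x)).map (get_sliced_str letters)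

theorem loop_cont (fuel : Nat) (letters : String) (k : Nat)
    (ih : LoopHyp fuel)
    (P : List Int) (a : Int) (L : Nat) (S : Int) (n : Int) (acc : List (List String))
    (hL : 1 ≤ L) (hS : (L : Int) + 1 ≤ S) (hk : P.length + 1 + L = k)
    (hn : P.sum + a + S = n) (hP : ∀ e ∈ P, 1 ≤ e) (ha : 1 ≤ a)
    (hf : (Rf k n (P ++ a :: maxC L S)).length < fuel + 1) :
    awtc_loop letters (k : Int) ((P ++ [a + 1]) ++ [S - 1])
        (acc ++ [get_sliced_str letters (P ++ a :: maxC L S)]) fuel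
      = acc ++ ((Rf k n (P ++ a :: maxC L S)).map (get_sliced_str letters)) := by
  have hstep := Rf_succ P a L S hL hS hk hn hP ha
  have hsum' : ((P ++ [a + 1]) ++ [S - 1]).sum = n := by
    simp only [List.sum_append, List.sum_cons, List.sum_nil]
    omega
  have hm' : k - ((P ++ [a + 1]).length + 1) = L - 1 := by
    simp only [List.length_append, List.length_cons, List.length_nil]
    omega
  have hlo' : loState k (P ++ [a + 1]) (S - 1) = P ++ (a + 1) :: minC L (S - 1) := by
    rw [loState, hm', minC]
    simp
  have happ := ih letters k (P ++ [a + 1]) (S - 1)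
    (acc ++ [get_sliced_str letters (P ++ a :: maxC L S)])
    (by omega)
    (by intro e he
        rcases List.mem_append.mp he with h | h
        · exact hP e h
        · simp only [List.mem_singleton] at h; omega)
    (by simp only [List.length_append, List.length_cons, List.length_nil]; omega)
    (by rw [hm']; omega)
    (by rw [hsum', hlo']
        rw [hstep] at hf
        simp only [List.length_cons] at hf
        omega)
  rw [hsum', hlo'] at happ
  rw [happ, hstep]
  simp

theorem loop_spec : ∀ (fuel : Nat), LoopHyp fuel := by
  intro fuel
  induction fuel with
  | zero =>
    intro letters k u x acc _ _ _ _ hf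
    exact absurd hf (by omega)
  | succ fuel ih =>
    intro letters k u x acc hk hu hlen hx hf
    rw [loState] at hf ⊢
    rw [loop_unfold, expand_spec (k - (u.length + 1)) (k : Int) u x (by omega)]
    set m := k - (u.length + 1) with hmdef
    set lo := u ++ List.replicate m 1 ++ [x - (m : Int)] with hlodef
    have hkeq : k = u.length + 1 + m := by omega
    by_cases hk1 : k = 1
    · subst hk1
      have hu0 : u = [] := List.eq_nil_of_length_eq_zero (by omega)
      have hm0 : m = 0 := by
        have h0 : u.length = 0 := by rw [hu0]; rfl
        omega
      have hlo1 : lo = [x] := by rw [hlodef, hm0, hu0]; simp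
      have hx1 : 1 ≤ x := by
        have : ((m : Nat) : Int) = 0 := by rw [hm0]; rfl
        omega
      rw [hlo1, stepNext_single, if_pos (by simp)]
      rw [stepEmit, if_pos (by simp)]
      have hs : ((u ++ [x]).sum) = x := by rw [hu0]; simp
      rw [hs]
      have hmin1 : minC 1 x = [x] := by simp [minC]
      rw [← hmin1, Rf_min (by norm_num), genComps, if_neg (by simp only [Nat.cast_one]; omega), if_pos rfl]
      simp [hmin1]
    · by_cases hx1 : x = (m : Int) + 1
      · rcases ones_or_split u with honeu | ⟨w, b, t, huw, hb⟩
        · -- u is all ones: this is the lexicographically last composition; the loop halts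
          have hrep1 : List.replicate m 1 ++ [x - (m : Int)] = List.replicate (m + 1) 1 := by
            rw [hx1, show ((m : Int) + 1 - (m : Int)) = 1 by ring, List.replicate_succ']
          have hlo2 : lo = List.replicate k 1 := by
            rw [hlodef, List.append_assoc, hrep1, honeu, ← List.replicate_add,
              show u.length + (m + 1) = k by omega]
          have hsn : stepNext (List.replicate k 1) = [1 + ((k - 1 : Nat) : Int)] := by
            conv_lhs => rw [show k = (k - 1) + 1 by omega]
            exact stepNext_ones (k - 1)
          rw [hlo2, hsn, if_pos (by simp)]
          rw [stepEmit, if_pos (by simp [beq_iff_eq])]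
          have hn2 : ((u ++ [x]).sum) = (k : Int) := by
            rw [honeu, hx1]
            simp [List.sum_replicate]
            omega
          rw [hn2]
          have hmaxeq : maxC k ((k : Nat) : Int) = List.replicate k 1 := by
            simp only [maxC]
            rw [show ((k : Int) - ((k - 1 : Nat) : Int)) = 1 by omega]
            conv_rhs => rw [show k = (k - 1) + 1 by omega]
            rw [List.replicate_succ]
          rw [← hmaxeq, Rf_max hk (by omega)]
          simp [hmaxeq]
        · -- u ends in b followed by ones (b ≥ 2): pop through the ones
          have hb2 : 2 ≤ b := by
            have hbu : b ∈ u := by rw [huw]; simp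
            have := hu b hbu
            omega
          have hlenu : u.length = w.length + t + 1 := by rw [huw]; simp; omega
          have hrep1 : List.replicate m 1 ++ [x - (m : Int)] = List.replicate (m + 1) 1 := by
            rw [hx1, show ((m : Int) + 1 - (m : Int)) = 1 by ring, List.replicate_succ']
          have hloB : lo = (w ++ [b]) ++ List.replicate (t + m + 1) 1 := by
            rw [hlodef, List.append_assoc, hrep1, huw,
              show t + m + 1 = t + (m + 1) by omega, List.replicate_add]
            simp
            rw [← List.replicate_succ', ← List.replicate_add]
          have hsumu : u.sum = w.sum + b + (t : Int) := by
            rw [huw]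
            simp [List.sum_replicate]
            push_cast
            ring
          rcases List.eq_nil_or_concat w with hwnil | ⟨w', aa, hww⟩
          · -- the whole state is b followed by ones: halt after this emission
            subst hwnil
            have hkval : k = t + m + 2 := by
              simp only [List.length_nil] at hlenu
              omega
            have hsn := stepNext_split_nil b (t + m + 1) (by omega)
            rw [hloB, hsn, if_pos (by simp)]
            rw [stepEmit, if_pos (by simp [beq_iff_eq]; omega)]
            have hn2 : ((u ++ [x]).sum) = b + ((t + m + 1 : Nat) : Int) := by
              simp only [List.sum_append, List.sum_cons, List.sum_nil]
              simp only [List.sum_nil] at hsumu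
              push_cast
              omega
            rw [hn2]
            have hmaxeq : maxC k (b + ((t + m + 1 : Nat) : Int))
                = ([] ++ [b]) ++ List.replicate (t + m + 1) 1 := by
              simp only [maxC]
              rw [show k - 1 = t + m + 1 by omega,
                show (b + ((t + m + 1 : Nat) : Int) - ((t + m + 1 : Nat) : Int)) = b by ring]
              simp
            rw [← hmaxeq, Rf_max hk (by push_cast; omega)]
            simp [hmaxeq]
          · -- increment the entry before b, reset the tail: continue with the successor
            rw [List.concat_eq_append] at hww
            have haa : 1 ≤ aa := by
              refine hu aa ?_
              rw [huw, hww]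
              simp
            have hkk : w'.length + 1 + (t + m + 2) = k := by
              have : w.length = w'.length + 1 := by rw [hww]; simp
              omega
            have hloB2 : lo = ((w' ++ [aa]) ++ [b]) ++ List.replicate (t + m + 1) 1 := by
              rw [hloB, hww]
            have hsn := stepNext_split w' aa b (t + m + 1) (by omega)
            rw [hloB2, hsn, if_neg (by simp)]
            rw [stepEmit, if_pos (by simp [beq_iff_eq]; omega)]
            have hloP : ((w' ++ [aa]) ++ [b]) ++ List.replicate (t + m + 1) 1
                = w' ++ aa :: maxC (t + m + 2) (b + ((t + m + 1 : Nat) : Int)) := by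
              simp only [maxC]
              rw [show t + m + 2 - 1 = t + m + 1 by omega,
                show (b + ((t + m + 1 : Nat) : Int) - ((t + m + 1 : Nat) : Int)) = b by ring]
              simp
            rw [hloP]
            rw [hloB2, hloP] at hf
            have hnn : w'.sum + aa + (b + ((t + m + 1 : Nat) : Int)) = ((u ++ [x]).sum) := by
              have hws : w.sum = w'.sum + aa := by rw [hww]; simp
              simp only [List.sum_append, List.sum_cons, List.sum_nil]
              rw [hws] at hsumu
              push_cast
              push_cast at hsumu
              omega
            exact loop_cont fuel letters k ih w' aa (t + m + 2) (b + ((t + m + 1 : Nat) : Int))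
              ((u ++ [x]).sum) acc (by omega) (by push_cast; omega) hkk hnn
              (fun e he => hu e (by rw [huw, hww]; simp [he])) haa hf
      · -- the last part is ≥ 2: decrement it, increment the part before it
        have hx2 : (m : Int) + 2 ≤ x := by omega
        rcases List.eq_nil_or_concat (u ++ List.replicate m 1) with hnil | ⟨Q, A, hQA⟩
        · exfalso
          have hL0 : (u ++ List.replicate m 1).length = 0 := by rw [hnil]; rfl
          simp only [List.length_append, List.length_replicate] at hL0
          omega
        · rw [List.concat_eq_append] at hQA
          have hA1 : 1 ≤ A := by
            have hmem : A ∈ u ++ List.replicate m 1 := by rw [hQA]; simp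
            rcases List.mem_append.mp hmem with h | h
            · exact hu A h
            · simp [List.eq_of_mem_replicate h]
          have hQe : ∀ e ∈ Q, 1 ≤ e := by
            intro e he
            have hmem : e ∈ u ++ List.replicate m 1 := by rw [hQA]; simp [he]
            rcases List.mem_append.mp hmem with h | h
            · exact hu e h
            · simp [List.eq_of_mem_replicate h]
          have hQlen : Q.length + 2 = k := by
            have := congrArg List.length hQA
            simp at this
            omega
          have hQsum : Q.sum + A = u.sum + (m : Int) := by
            have := congrArg List.sum hQA
            simp [List.sum_replicate] at this
            omega
          have hloQ : lo = (Q ++ [A]) ++ [x - (m : Int)] := by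
            rw [hlodef, hQA]
          have hsn : stepNext ((Q ++ [A]) ++ [x - (m : Int)]) = (Q ++ [A + 1]) ++ [x - (m : Int) - 1] := by
            have h0 := stepNext_split Q A (x - (m : Int)) 0 (by omega)
            simpa using h0
          rw [hloQ, hsn, if_neg (by simp)]
          rw [stepEmit, if_pos (by simp [beq_iff_eq]; omega)]
          have hloP : (Q ++ [A]) ++ [x - (m : Int)] = Q ++ A :: maxC 1 (x - (m : Int)) := by
            simp [maxC]
          rw [hloP]
          rw [hloQ, hloP] at hf
          have hnn : Q.sum + A + (x - (m : Int)) = ((u ++ [x]).sum) := by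
            simp only [List.sum_append, List.sum_cons, List.sum_nil]
            omega
          have hcont := loop_cont fuel letters k ih Q A 1 (x - (m : Int)) ((u ++ [x]).sum) acc
            (by omega) (by push_cast; omega) (by omega) hnn hQe hA1 hf
          -- x - m - 1 = (x - m) - 1 syntactically
          exact hcont

-- ===== degenerate case num_words <= 0 =====

theorem loop_nonpos (letters : String) (nw : Int) (hnw : nw ≤ 0) (n : Int) (fuel : Nat) :
    awtc_loop letters nw [n] [] (fuel + 1) = [] := by
  rw [loop_unfold, expand_stop (by simp; omega), stepNext_single, if_pos (by simp)]
  rw [stepEmit, if_neg (by simp; omega)]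

-- ===== B-side: the recursion enumerates genComps =====

theorem get_sliced_go_acc : ∀ (slices : List Int) (letters : String) (res : List String),
    get_sliced_go letters slices res = res ++ get_sliced_go letters slices [] := by
  intro slices
  induction slices with
  | nil => intro letters res; simp [get_sliced_go]
  | cons i rest ih =>
    intro letters res
    rw [get_sliced_go]
    conv_rhs => rw [get_sliced_go]
    rw [ih _ (res ++ [PySem.Str.slice letters none (some i)]),
      ih _ ([] ++ [PySem.Str.slice letters none (some i)])]
    simp

theorem get_sliced_cons (letters : String) (i : Int) (rest : List Int) :
    get_sliced_str letters (i :: rest)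
      = PySem.Str.slice letters none (some i)
        :: get_sliced_str (PySem.Str.slice letters (some i) none) rest := by
  rw [get_sliced_str, get_sliced_go, get_sliced_go_acc, get_sliced_str]
  simp

theorem slice_none_len (s : String) :
    PySem.Str.slice s none (some (PySem.Str.len s)) = s := by
  apply String.toList_inj.mp
  rw [PySem.Str.toList_slice, PySem.Chars.slice_eq_listSlice, PySem.Str.len_eq,
    PySem.List.slice_to _ (by positivity)]
  simp

theorem len_slice_from (s : String) (f : Int) (h0 : 0 ≤ f) (h1 : f ≤ PySem.Str.len s) :
    PySem.Str.len (PySem.Str.slice s (some f) none) = PySem.Str.len s - f := by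
  rw [PySem.Str.len_eq, PySem.Str.toList_slice, PySem.Chars.slice_eq_listSlice,
    PySem.List.slice_from _ h0, List.length_drop]
  rw [PySem.Str.len_eq] at h1 ⊢
  omega

theorem alt_eq : ∀ (k : Nat) (letters : String) (nw : Int), nw.toNat = k →
    all_ways_to_cut_alt letters nw
      = (genComps k (PySem.Str.len letters)).map (get_sliced_str letters) := by
  intro k
  induction k using Nat.strong_induction_on with
  | _ k ih =>
    intro letters nw hk
    rw [all_ways_to_cut_alt, genComps]
    by_cases h0 : nw ≤ 0 ∨ PySem.Str.len letters < nw
    · rw [dif_pos h0, if_pos (by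
        rcases h0 with h | h
        · left; omega
        · by_cases hnw : nw ≤ 0
          · left; omega
          · right; omega)]
      simp
    · rw [dif_neg h0]
      push_neg at h0
      have hkz : (k : Int) = nw := by omega
      rw [if_neg (by rintro (h | h) <;> omega)]
      by_cases h1 : nw = 1
      · rw [dif_pos h1, if_pos (by omega)]
        have hone : get_sliced_str letters [PySem.Str.len letters] = [letters] := by
          rw [get_sliced_cons, slice_none_len]
          rfl
        simp only [List.map_cons, List.map_nil, hone]
      · rw [dif_neg h1, if_neg (by omega)]
        rw [hkz, List.map_flatMap]
        apply List.flatMap_congr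
        intro f hf
        rw [PySem.List.mem_pyRange_one] at hf
        have hlen' : PySem.Str.len (PySem.Str.slice letters (some f) none)
            = PySem.Str.len letters - f :=
          len_slice_from letters f (by omega) (by omega)
        rw [ih (k - 1) (by omega) _ (nw - 1) (by omega), hlen']
        rw [List.map_map, List.map_map]
        apply List.map_congr_left
        intro t ht
        simp only [Function.comp]
        rw [get_sliced_cons]

-- ===== assembly =====

theorem final_eq : ∀ (letters : String) (num_words : Int),
    all_ways_to_cut letters num_words = all_ways_to_cut_alt letters num_words := by
  intro letters nw
  rw [all_ways_to_cut]
  by_cases hg : PySem.Str.len letters < nw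
  · rw [if_pos hg, all_ways_to_cut_alt, dif_pos (Or.inr hg)]
  · rw [if_neg hg]
    by_cases hp : nw ≤ 0
    · rw [loop_nonpos letters nw hp, all_ways_to_cut_alt, dif_pos (Or.inl hp)]
    · have h1k : 1 ≤ nw.toNat := by omega
      have hco : ((nw.toNat : Nat) : Int) = nw := by omega
      have hlenpos : (0 : Int) ≤ PySem.Str.len letters := by
        rw [PySem.Str.len_eq]; positivity
      have hl := loop_spec (2 ^ (PySem.Str.len letters).toNat + 1) letters nw.toNat []
        (PySem.Str.len letters) [] h1k (by simp) (by simp only [List.length_nil]; omega) ?hx ?hfuel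
      case hx =>
        simp only [List.length_nil]
        omega
      case hfuel =>
        calc (Rf nw.toNat (([] ++ [PySem.Str.len letters]).sum)
                (loState nw.toNat [] (PySem.Str.len letters))).length
            ≤ (genComps nw.toNat (([] ++ [PySem.Str.len letters]).sum)).length := by
              rw [Rf]
              exact List.length_filter_le _ _
          _ ≤ 2 ^ ((([] : List Int) ++ [PySem.Str.len letters]).sum).toNat :=
              genComps_length_le _ _
          _ < 2 ^ (PySem.Str.len letters).toNat + 1 := by simp
      have hlo0 : loState nw.toNat [] (PySem.Str.len letters)
          = minC nw.toNat (PySem.Str.len letters) := by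
        rw [loState, minC]
        simp
      simp only [List.nil_append] at hl
      rw [← hco, hl, hlo0]
      have hsum0 : ([PySem.Str.len letters] : List Int).sum = PySem.Str.len letters := by simp
      rw [hsum0, Rf_min h1k, alt_eq nw.toNat letters ((nw.toNat : Nat) : Int) (by omega)]

-- ===== VERDICT (by name: the statement is the Claim_ definition above) =====
theorem all_ways_to_cut_spec : Claim_equal_all_ways_to_cut := by
  intro letters num_words _
  exact final_eq letters num_words
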